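-- pv_equiv track=rewrite | github.com/deepak01112002/PythonLearning-Step-By-Step | set2/4th.py | ArrangeStr
-- ===== SOURCE A (Python) =====
-- def ArrangeStr(s1):
--   lower = ""
--   upper = ""
--   for x in s1:
--     if x.islower():
--       lower += x
--     else:
--       upper += x
--   ans = lower + upper
--   return ans
-- ===== SOURCE B (Python) =====
-- def ArrangeStr(s1):
--   return ''.join(sorted(s1, key=lambda c: not c.islower()))
-- ===== Notes on version B (the rewrite author's own statement) =====
-- stated objective: idiomatic
-- what changed: Replaces the explicit loop with two string accumulators by a single stable-sort call keyed on non-lowercaseness, whose stability yields the same lowercase-first partition.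
import Mathlib
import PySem

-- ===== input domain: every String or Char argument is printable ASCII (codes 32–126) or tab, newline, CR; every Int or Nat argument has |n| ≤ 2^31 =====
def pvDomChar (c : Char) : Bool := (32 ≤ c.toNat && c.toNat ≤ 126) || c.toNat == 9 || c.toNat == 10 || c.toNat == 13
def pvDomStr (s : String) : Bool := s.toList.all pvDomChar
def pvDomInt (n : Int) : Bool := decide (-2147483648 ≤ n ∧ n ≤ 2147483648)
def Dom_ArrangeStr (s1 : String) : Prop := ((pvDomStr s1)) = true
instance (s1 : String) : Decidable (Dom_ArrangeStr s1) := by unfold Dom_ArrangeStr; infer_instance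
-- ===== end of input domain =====

-- B replaces A's two-accumulator loop by one stable sort keyed on "not islower" (idiomatic rewrite).


-- ===== PORT A =====
def ArrangeStr (s1 : String) : String :=
  let r := s1.toList.foldl
    (fun (acc : String × String) x =>
      if PySem.Chars.islower x then (acc.1.push x, acc.2) else (acc.1, acc.2.push x))
    ("", "")
  r.1 ++ r.2

-- ===== PORT B =====
def ArrangeStr_alt (s1 : String) : String :=
  String.ofList (PySem.List.sorted s1.toList (fun c => !PySem.Chars.islower c) false)

-- ===== PRECONDITION & SPEC =====
def Spec_ArrangeStr (s1 : String) (out : String) : Prop := out = ArrangeStr_alt s1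
instance (s1 : String) (out : String) : Decidable (Spec_ArrangeStr s1 out) := by unfold Spec_ArrangeStr; infer_instance

-- ===== CLAIM (what is proved, stated in full; the proofs are below) =====
def Claim_equal_ArrangeStr : Prop := ∀ (s1 : String), Dom_ArrangeStr s1 → Spec_ArrangeStr s1 (ArrangeStr s1)

-- ===== LEMMAS AND PROOFS =====

-- inserting a key-false (lowercase) element into (lows ++ highs) puts it after the lows
theorem pv_insertBy_lower (x : Char) (hx : PySem.Chars.islower x = true) :
    ∀ (l u : List Char), (∀ c ∈ l, PySem.Chars.islower c = true) →
      (∀ c ∈ u, PySem.Chars.islower c = false) →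
      PySem.List.insertBy (fun a b => decide ((!PySem.Chars.islower a) < (!PySem.Chars.islower b)))
        x (l ++ u) = (l ++ [x]) ++ u := by
  intro l
  induction l with
  | nil =>
    intro u _ hu
    cases u with
    | nil => simp [PySem.List.insertBy]
    | cons y ys =>
      have hy : PySem.Chars.islower y = false := hu y (by simp)
      simp [PySem.List.insertBy, hx, hy]
  | cons c cs ih =>
    intro u hl hu
    have hc : PySem.Chars.islower c = true := hl c (by simp)
    have := ih u (fun d hd => hl d (by simp [hd])) hu
    simp [PySem.List.insertBy, hx, hc, this]

-- inserting a key-true (non-lowercase) element appends it at the end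
theorem pv_insertBy_upper (x : Char) (hx : PySem.Chars.islower x = false) (ys : List Char) :
    PySem.List.insertBy (fun a b => decide ((!PySem.Chars.islower a) < (!PySem.Chars.islower b)))
      x ys = ys ++ [x] := by
  induction ys with
  | nil => simp [PySem.List.insertBy]
  | cons y ys ih => simp [PySem.List.insertBy, hx, ih]

-- the insertion-sort fold maintains the partition invariant
theorem pv_foldl_partition :
    ∀ (xs l u : List Char), (∀ c ∈ l, PySem.Chars.islower c = true) →
      (∀ c ∈ u, PySem.Chars.islower c = false) →
      xs.foldl (fun acc x =>
          PySem.List.insertBy (fun a b => decide ((!PySem.Chars.islower a) < (!PySem.Chars.islower b))) x acc)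
        (l ++ u)
      = (l ++ xs.filter (fun c => PySem.Chars.islower c)) ++
        (u ++ xs.filter (fun c => !PySem.Chars.islower c)) := by
  intro xs
  induction xs with
  | nil => intro l u _ _; simp
  | cons x xs ih =>
    intro l u hl hu
    by_cases hx : PySem.Chars.islower x = true
    · have hstep := pv_insertBy_lower x hx l u hl hu
      have hrec := ih (l ++ [x]) u
        (by intro c hc; rcases List.mem_append.mp hc with h | h
            · exact hl c h
            · simp at h; subst h; exact hx) hu
      simp only [List.foldl_cons, hstep, hrec]
      simp [hx]
    · have hx' : PySem.Chars.islower x = false := by simpa using hx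
      have hstep := pv_insertBy_upper x hx' (l ++ u)
      have hrec := ih l (u ++ [x]) hl
        (by intro c hc; rcases List.mem_append.mp hc with h | h
            · exact hu c h
            · simp at h; subst h; exact hx')
      simp only [List.foldl_cons, hstep, List.append_assoc, hrec]
      simp [hx']

-- B's sort collapses to the two-filter partition
theorem pv_sorted_eq_partition (xs : List Char) :
    PySem.List.sorted xs (fun c => !PySem.Chars.islower c) false
      = xs.filter (fun c => PySem.Chars.islower c) ++ xs.filter (fun c => !PySem.Chars.islower c) := by
  have h := pv_foldl_partition xs [] [] (by simp) (by simp)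
  simpa [PySem.List.sorted] using h

-- A's fold maintains its accumulators as string appends of the filters
theorem pv_foldA (xs : List Char) :
    ∀ (lo up : String),
      xs.foldl (fun (acc : String × String) x =>
          if PySem.Chars.islower x then (acc.1.push x, acc.2) else (acc.1, acc.2.push x)) (lo, up)
      = (lo ++ String.ofList (xs.filter (fun c => PySem.Chars.islower c)),
         up ++ String.ofList (xs.filter (fun c => !PySem.Chars.islower c))) := by
  induction xs with
  | nil =>
    intro lo up
    rw [List.foldl_nil, List.filter_nil, List.filter_nil, Prod.mk.injEq]
    constructor <;> (rw [← String.toList_inj]; simp)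
  | cons x xs ih =>
    intro lo up
    by_cases hx : PySem.Chars.islower x = true
    · rw [List.foldl_cons, if_pos hx, ih, List.filter_cons, List.filter_cons, Prod.mk.injEq]
      constructor <;> (rw [← String.toList_inj]; simp [hx])
    · have hx' : PySem.Chars.islower x = false := by simpa using hx
      rw [List.foldl_cons, if_neg hx, ih, List.filter_cons, List.filter_cons, Prod.mk.injEq]
      constructor <;> (rw [← String.toList_inj]; simp [hx'])

-- ===== VERDICT (by name: the statement is the Claim_ definition above) =====
theorem ArrangeStr_spec : Claim_equal_ArrangeStr := by
  intro s1 _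
  show ArrangeStr s1 = ArrangeStr_alt s1
  unfold ArrangeStr ArrangeStr_alt
  rw [pv_sorted_eq_partition, pv_foldA, ← String.toList_inj]
  simp
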